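-- pv_equiv track=rewrite | github.com/MrNK2107/ProcureWatch | captcha.py | string_label
-- ===== SOURCE A (Python) =====
-- import string
-- import string
--
-- all_characters = string.ascii_letters+"0123456789"
--
-- def string_label(string):
--   out = []
--   index = 0
--   for char_string in string:
--     for char_index in range(0,len(all_characters)):
--       if char_string == all_characters[char_index]:
--         out.append(int(char_index))
--         break
--   return out
-- ===== SOURCE B (Python) =====
-- # B: classify each character by code-point range (closed-form index) instead of scanning the 62-char table.
-- def string_label(string):
--   out = []
--   for c in string:
--     if 'a' <= c <= 'z':
--       out.append(ord(c) - ord('a'))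
--     elif 'A' <= c <= 'Z':
--       out.append(26 + ord(c) - ord('A'))
--     elif '0' <= c <= '9':
--       out.append(52 + ord(c) - ord('0'))
--   return out
-- ===== Notes on version B (the rewrite author's own statement) =====
-- stated objective: idiomatic
-- what changed: Replaces the inner scan over the 62-character table with a direct code-point-range classification computing each index arithmetically.
import Mathlib
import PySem

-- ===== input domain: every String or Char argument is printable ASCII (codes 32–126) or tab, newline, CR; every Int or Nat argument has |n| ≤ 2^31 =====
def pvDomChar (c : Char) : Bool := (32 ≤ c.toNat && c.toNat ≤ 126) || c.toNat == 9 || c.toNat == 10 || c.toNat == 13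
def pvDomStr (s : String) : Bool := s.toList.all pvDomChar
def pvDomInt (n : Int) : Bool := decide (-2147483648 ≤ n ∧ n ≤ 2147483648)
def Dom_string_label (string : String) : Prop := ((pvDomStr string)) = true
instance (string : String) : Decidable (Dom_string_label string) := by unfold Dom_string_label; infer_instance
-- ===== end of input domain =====

-- B replaces A's inner scan of the 62-char table by a closed-form code-point-range index (more idiomatic).


-- ===== PORT A =====
def allCharacters : String := "abcdefghijklmnopqrstuvwxyzABCDEFGHIJKLMNOPQRSTUVWXYZ0123456789"

-- inner 'for char_index in range(...)' with its break: recursion over the range list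
def aScan (c : Char) (idxs : List Int) (out : List Int) : List Int :=
  match idxs with
  | [] => out
  | i :: rest =>
    if PySem.Str.pyGet? allCharacters i = some c then out ++ [i]
    else aScan c rest out

def string_label (string : String) : List Int :=
  string.toList.foldl
    (fun out c => aScan c (PySem.List.pyRange 0 (PySem.Str.len allCharacters) 1) out) []

-- ===== PORT B =====
def bIndex? (c : Char) : Option Int :=
  if 'a' ≤ c ∧ c ≤ 'z' then some ((c.toNat : Int) - 97)
  else if 'A' ≤ c ∧ c ≤ 'Z' then some (26 + (c.toNat : Int) - 65)
  else if '0' ≤ c ∧ c ≤ '9' then some (52 + (c.toNat : Int) - 48)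
  else none

def string_label_alt (string : String) : List Int :=
  string.toList.filterMap bIndex?

-- ===== PRECONDITION & SPEC =====
def Spec_string_label (string : String) (out : List Int) : Prop := out = string_label_alt string
instance (string : String) (out : List Int) : Decidable (Spec_string_label string out) := by unfold Spec_string_label; infer_instance

-- ===== CLAIM (what is proved, stated in full; the proofs are below) =====
def Claim_equal_string_label : Prop := ∀ (string : String), Dom_string_label string → Spec_string_label string (string_label string)

-- ===== LEMMAS AND PROOFS =====

lemma aScan_append (c : Char) (idxs : List Int) (out : List Int) :
    aScan c idxs out = out ++ aScan c idxs [] := by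
  induction idxs generalizing out with
  | nil => simp [aScan]
  | cons i rest ih =>
    simp only [aScan]
    split
    · simp
    · exact ih out

lemma perChar_all :
    (List.range 128).all (fun n =>
      aScan (Char.ofNat n) (PySem.List.pyRange 0 (PySem.Str.len allCharacters) 1) []
        == (bIndex? (Char.ofNat n)).toList) = true := by decide

lemma perChar (c : Char) (hc : pvDomChar c = true) :
    aScan c (PySem.List.pyRange 0 (PySem.Str.len allCharacters) 1) []
      = (bIndex? c).toList := by
  have hlt : c.toNat < 128 := by
    simp only [pvDomChar, Bool.or_eq_true, Bool.and_eq_true, decide_eq_true_eq,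
      beq_iff_eq] at hc
    rcases hc with ((⟨h1, h2⟩ | h) | h) | h <;> omega
  have hmem : c.toNat ∈ List.range 128 := List.mem_range.mpr hlt
  have := List.all_eq_true.mp perChar_all _ hmem
  simpa [Char.ofNat_toNat] using this

lemma foldl_eq (l : List Char) (out : List Int) (h : l.all pvDomChar = true) :
    l.foldl (fun out c => aScan c (PySem.List.pyRange 0 (PySem.Str.len allCharacters) 1) out) out
      = out ++ l.filterMap bIndex? := by
  induction l generalizing out with
  | nil => simp
  | cons c rest ih =>
    simp only [List.all_cons, Bool.and_eq_true] at h
    simp only [List.foldl_cons]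
    rw [aScan_append, perChar c h.1, ih _ h.2]
    cases hb : bIndex? c <;> simp [hb]

-- ===== VERDICT (by name: the statement is the Claim_ definition above) =====
theorem string_label_spec : Claim_equal_string_label := by
  intro s hd
  unfold Spec_string_label string_label string_label_alt
  exact foldl_eq s.toList [] hd
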